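-- pv_equiv track=rewrite | github.com/jonathantsang/CompetitiveProgramming | kattis/lawnmower/lawnmower.py | entire_interval
-- ===== SOURCE A (Python) =====
-- def entire_interval(intervals, start, end):
--     # want start to end
-- 	intervals.sort()
-- 	i = 0
-- 	while(i < len(intervals)-1):
-- 		if intervals[i][1] >= intervals[i+1][0]:
-- 			intervals[i][1] = max(intervals[i][1], intervals[i+1][1])
-- 			intervals.pop(i+1)
-- 		else:
-- 			i += 1
-- 	if len(intervals) > 1 or intervals[0][0] > start or intervals[0][1] < end:
-- 		return False
-- 	else:
-- 		return True
-- ===== SOURCE B (Python) =====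
-- def entire_interval(intervals, start, end):
--     # Single pass over the sorted intervals with a running "reach" instead of
--     # repeatedly merging and popping intervals; return value identical on well-formed input.
--     # (Like A, this sorts `intervals` in place; unlike A it does not pop/mutate elements.)
--     intervals.sort()
--     first = intervals[0]
--     if first[0] > start:
--         return False
--     reach = first[1]
--     for iv in intervals[1:]:
--         if iv[0] > reach:
--             return False
--         if iv[1] > reach:
--             reach = iv[1]
--     return reach >= end
-- ===== Notes on version B (the rewrite author's own statement) =====
-- stated objective: alternative
-- what changed: Replaces the quadratic merge loop that repeatedly pops overlapping neighbours out of the sorted list by a single left-to-right scan carrying the furthest covered point (reach), returning False at the first gap.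
-- outside the precondition, e.g. on entire_interval([[5]], 0, 1): A returns False, B returns False
import Mathlib
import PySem

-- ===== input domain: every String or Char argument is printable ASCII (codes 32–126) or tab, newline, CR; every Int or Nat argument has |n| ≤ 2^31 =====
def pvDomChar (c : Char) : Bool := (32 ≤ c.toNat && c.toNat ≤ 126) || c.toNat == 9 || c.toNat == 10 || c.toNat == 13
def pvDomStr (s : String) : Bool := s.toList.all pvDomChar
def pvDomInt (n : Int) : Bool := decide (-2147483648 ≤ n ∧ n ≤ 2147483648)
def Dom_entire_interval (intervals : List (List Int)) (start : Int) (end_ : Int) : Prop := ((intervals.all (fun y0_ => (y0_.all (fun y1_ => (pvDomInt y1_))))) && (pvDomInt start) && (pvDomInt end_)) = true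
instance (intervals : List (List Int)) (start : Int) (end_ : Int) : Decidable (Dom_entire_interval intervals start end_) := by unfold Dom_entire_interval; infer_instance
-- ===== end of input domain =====

-- B replaces A's pop-based merge of the sorted intervals by a single scan carrying the
-- furthest covered point (objective: alternative). Both Pythons sort `intervals` in place; A
-- additionally pops/mutates elements — the equivalence proved here is about the RETURN value only.

-- ===== PORT A =====
-- A's while loop: either i advances, or intervals[i][1] = max(...) and intervals.pop(i+1)
-- (pop at index i+1 < len is exactly List.eraseIdx; the guard makes that index valid).
-- Each iteration strictly decreases xs.length - i, so fuel = xs.length bounds the loop.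
def pvMergeLoop : Nat → List (List Int) → Nat → List (List Int)
  | 0, xs, _ => xs
  | fuel + 1, xs, i =>
    if i < xs.length - 1 then
      if PySem.List.pyGetD (PySem.List.pyGetD xs ((i : Nat) : Int) []) 1 0
           ≥ PySem.List.pyGetD (PySem.List.pyGetD xs ((i + 1 : Nat) : Int) []) 0 0 then
        pvMergeLoop fuel ((xs.set i (PySem.List.pySetD (PySem.List.pyGetD xs ((i : Nat) : Int) []) 1
          (max (PySem.List.pyGetD (PySem.List.pyGetD xs ((i : Nat) : Int) []) 1 0)
               (PySem.List.pyGetD (PySem.List.pyGetD xs ((i + 1 : Nat) : Int) []) 1 0)))).eraseIdx (i + 1)) i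
      else
        pvMergeLoop fuel xs (i + 1)
    else xs

def entire_interval (intervals : List (List Int)) (start : Int) (end_ : Int) : Bool :=
  let s := PySem.List.sorted intervals (fun x => x) false
  let m := pvMergeLoop s.length s 0
  if m.length > 1 || PySem.List.pyGetD (PySem.List.pyGetD m 0 []) 0 0 > start
       || PySem.List.pyGetD (PySem.List.pyGetD m 0 []) 1 0 < end_ then
    false
  else
    true

-- ===== PORT B =====
-- B's for loop over intervals[1:], carrying `reach`
def pvScan (reach : Int) (end_ : Int) (rest : List (List Int)) : Bool :=
  match rest with
  | [] => reach ≥ end_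
  | iv :: t =>
    if PySem.List.pyGetD iv 0 0 > reach then false
    else pvScan (if PySem.List.pyGetD iv 1 0 > reach then PySem.List.pyGetD iv 1 0 else reach) end_ t

def entire_interval_alt (intervals : List (List Int)) (start : Int) (end_ : Int) : Bool :=
  let s := PySem.List.sorted intervals (fun x => x) false
  let first := PySem.List.pyGetD s 0 []
  if PySem.List.pyGetD first 0 0 > start then false
  else pvScan (PySem.List.pyGetD first 1 0) end_ (PySem.List.slice s (some 1) none)

-- ===== PRECONDITION & SPEC =====
-- Pre_ excludes the empty list and lists containing an interval with fewer than 2 endpoints: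
-- A raises IndexError on these, except in the degenerate short-circuit case where the first
-- sorted interval is a singleton starting above `start` (then both A and B return False).
def Pre_entire_interval (intervals : List (List Int)) (start : Int) (end_ : Int) : Prop :=
  intervals ≠ [] ∧ ∀ iv ∈ intervals, 2 ≤ iv.length
instance (intervals : List (List Int)) (start : Int) (end_ : Int) : Decidable (Pre_entire_interval intervals start end_) := by unfold Pre_entire_interval; infer_instance
def pvWitness_entire_interval : List (List Int) × Int × Int := ([[1, 3], [2, 5]], 1, 5)

def Spec_entire_interval (intervals : List (List Int)) (start : Int) (end_ : Int) (out : Bool) : Prop := out = entire_interval_alt intervals start end_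
instance (intervals : List (List Int)) (start : Int) (end_ : Int) (out : Bool) : Decidable (Spec_entire_interval intervals start end_ out) := by unfold Spec_entire_interval; infer_instance

-- ===== CLAIM (what is proved, stated in full; the proofs are below) =====
def Claim_equal_entire_interval : Prop := ∀ (intervals : List (List Int)) (start : Int) (end_ : Int), Dom_entire_interval intervals start end_ → Pre_entire_interval intervals start end_ → Spec_entire_interval intervals start end_ (entire_interval intervals start end_)

-- ===== LEMMAS AND PROOFS =====

lemma pvGet_cons_succ (x : List Int) (xs : List (List Int)) (i : Nat) :
    PySem.List.pyGetD (x :: xs) ((i + 1 : Nat) : Int) ([] : List Int)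
      = PySem.List.pyGetD xs ((i : Nat) : Int) [] := by
  rw [PySem.List.pyGetD_natCast, PySem.List.pyGetD_natCast, List.getD_cons_succ]

lemma pvGet_one_cons (x y : Int) (t : List Int) :
    PySem.List.pyGetD (x :: y :: t) 1 0 = y := by
  rw [PySem.List.pyGetD_ofNat' _ 1, List.getD_cons_succ, List.getD_cons_zero]

-- the loop body at index i+1 never touches the head
lemma pvMergeLoop_cons_succ (f : Nat) : ∀ (ys : List (List Int)) (i : Nat) (a : List Int),
    pvMergeLoop f (a :: ys) (i + 1) = a :: pvMergeLoop f ys i := by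
  induction f with
  | zero => intro ys i a; rfl
  | succ f ih =>
    intro ys i a
    by_cases h : i < ys.length - 1
    · have h' : i + 1 < (a :: ys).length - 1 := by simp; omega
      rw [pvMergeLoop, pvMergeLoop, if_pos h', if_pos h, pvGet_cons_succ, pvGet_cons_succ]
      split_ifs
      · rw [List.set_cons_succ, List.eraseIdx_cons_succ, ih]
      · exact ih ys (i + 1) a
    · have h' : ¬ (i + 1 < (a :: ys).length - 1) := by simp; omega
      rw [pvMergeLoop, pvMergeLoop, if_neg h', if_neg h]

lemma pvMergeLoop_ne_nil (f : Nat) : ∀ (xs : List (List Int)) (i : Nat), xs ≠ [] →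
    pvMergeLoop f xs i ≠ [] := by
  induction f with
  | zero => intro xs i h; exact h
  | succ f ih =>
    intro xs i h
    rw [pvMergeLoop]
    by_cases hg : i < xs.length - 1
    · rw [if_pos hg]
      split
      · apply ih
        intro hnil
        have h2 : i + 1 < xs.length := by omega
        have := congrArg List.length hnil
        simp [List.length_eraseIdx, List.length_set, h2] at this
        omega
      · exact ih xs (i + 1) h
    · rw [if_neg hg]; exact h

-- the heart of the proof: on any nonempty list of length-≥2 intervals (sorted or not),
-- A's merge-then-check equals B's single scan
lemma pvMain (t : List (List Int)) : ∀ (a : List Int) (start end_ : Int),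
    2 ≤ a.length → (∀ iv ∈ t, 2 ≤ iv.length) →
    (if (pvMergeLoop (t.length + 1) (a :: t) 0).length > 1
        || PySem.List.pyGetD (PySem.List.pyGetD (pvMergeLoop (t.length + 1) (a :: t) 0) 0 []) 0 0 > start
        || PySem.List.pyGetD (PySem.List.pyGetD (pvMergeLoop (t.length + 1) (a :: t) 0) 0 []) 1 0 < end_ then
       false else true)
    = (if PySem.List.pyGetD a 0 0 > start then false
       else pvScan (PySem.List.pyGetD a 1 0) end_ t) := by
  induction t with
  | nil =>
    intro a start end_ _ _
    rw [pvMergeLoop, if_neg (show ¬ ((0:Nat) < [a].length - 1) by simp)]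
    simp only [pvScan, List.length_singleton, gt_iff_lt, Nat.lt_irrefl, decide_false,
      PySem.List.pyGetD_zero_cons, Bool.false_or, ge_iff_le]
    by_cases h1 : start < PySem.List.pyGetD a 0 0 <;>
      by_cases h2 : PySem.List.pyGetD a 1 0 < end_ <;>
        (simp [h1, h2]; try omega)
  | cons b rest ih =>
    intro a start end_ ha ht
    have hb : 2 ≤ b.length := ht b (by simp)
    have hrest : ∀ iv ∈ rest, 2 ≤ iv.length := fun iv hiv => ht iv (by simp [hiv])
    have e0 : PySem.List.pyGetD (a :: b :: rest) ((0 : Nat) : Int) ([] : List Int) = a := by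
      rw [PySem.List.pyGetD_natCast]; rfl
    have e1 : PySem.List.pyGetD (a :: b :: rest) ((0 + 1 : Nat) : Int) ([] : List Int) = b := by
      rw [PySem.List.pyGetD_natCast]; rfl
    rw [pvMergeLoop, if_pos (show (0:Nat) < (a :: b :: rest).length - 1 by simp), e0, e1]
    simp only [List.length_cons]
    by_cases hab : PySem.List.pyGetD a 1 0 ≥ PySem.List.pyGetD b 0 0
    · -- merge branch: the list becomes a' :: rest with a'[1] = max a1 b1
      rw [if_pos hab]
      set M := max (PySem.List.pyGetD a 1 0) (PySem.List.pyGetD b 1 0) with hM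
      have ha' : PySem.List.pySetD a 1 M = a.set 1 M := by
        rw [PySem.List.pySetD_of_nonneg a M (by norm_num)]; rfl
      rw [List.set_cons_zero, List.eraseIdx_cons_succ, List.eraseIdx_cons_zero, ha']
      have hlen' : 2 ≤ (a.set 1 M).length := by simpa using ha
      have h0' : PySem.List.pyGetD (a.set 1 M) 0 0 = PySem.List.pyGetD a 0 0 := by
        rcases a with _ | ⟨x, t'⟩ <;> simp [List.set, PySem.List.pyGetD_zero_cons]
      have h1' : PySem.List.pyGetD (a.set 1 M) 1 0 = M := by
        rcases a with _ | ⟨x, _ | ⟨y, t'⟩⟩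
        · simp at ha
        · simp at ha
        · simp only [List.set, pvGet_one_cons]
      rw [ih (a.set 1 M) start end_ hlen' hrest, h0', h1']
      -- B's scan step absorbs b into the reach
      have hstep : pvScan (PySem.List.pyGetD a 1 0) end_ (b :: rest) = pvScan M end_ rest := by
        rw [pvScan, if_neg (by omega)]
        have : (if PySem.List.pyGetD b 1 0 > PySem.List.pyGetD a 1 0
                then PySem.List.pyGetD b 1 0 else PySem.List.pyGetD a 1 0) = M := by
          rw [hM]; split <;> omega
        rw [this]
      rw [hstep]
    · -- gap branch: i advances, the final list keeps ≥ 2 elements, both sides return False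
      rw [if_neg hab, pvMergeLoop_cons_succ]
      have hscan : pvScan (PySem.List.pyGetD a 1 0) end_ (b :: rest) = false := by
        rw [pvScan, if_pos (by omega)]
      rw [hscan]
      cases hm : pvMergeLoop (rest.length + 1) (b :: rest) 0 with
      | nil => exact absurd hm (pvMergeLoop_ne_nil _ _ _ (by simp))
      | cons c cs => simp

-- ===== VERDICT (by name: the statement is the Claim_ definition above) =====
theorem entire_interval_spec : Claim_equal_entire_interval := by
  intro intervals start end_ _ hpre
  obtain ⟨hne, hlen⟩ := hpre
  unfold Spec_entire_interval entire_interval entire_interval_alt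
  have hsne : PySem.List.sorted intervals (fun x => x) false ≠ [] := by
    rw [ne_eq, PySem.List.sorted_eq_nil_iff]; exact hne
  have hslen : ∀ iv ∈ PySem.List.sorted intervals (fun x => x) false, 2 ≤ iv.length := by
    intro iv hiv
    exact hlen iv ((PySem.List.mem_sorted intervals _ false iv).mp hiv)
  cases hs : PySem.List.sorted intervals (fun x => x) false with
  | nil => exact absurd hs hsne
  | cons a t =>
    have ha : 2 ≤ a.length := hslen a (by rw [hs]; simp)
    have ht : ∀ iv ∈ t, 2 ≤ iv.length := fun iv hiv => hslen iv (by rw [hs]; simp [hiv])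
    simp only [PySem.List.slice_from_one, List.tail_cons, PySem.List.pyGetD_zero_cons,
      List.length_cons]
    exact pvMain t a start end_ ha ht
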